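-- pv_equiv track=rewrite | github.com/wherby/code | contest/00000c443d154/d176/q2/t2.py | prefixConnected
-- ===== SOURCE A (Python) =====
-- from typing import List, Tuple, Optional
-- from collections import defaultdict,deque
--
-- def prefixConnected(words: List[str], k: int) -> int:
--     dic =defaultdict(list)
--     cnt =0
--     for word in words:
--         if len(word)<k:continue
--         dic[word[:k]].append(word)
--     for _,vs in dic.items():
--         if len(vs)>=2:
--             cnt +=1
--     return cnt
-- ===== SOURCE B (Python) =====
-- def prefixConnected(words, k):
--     prefs = sorted(word[:k] for word in words if len(word) >= k)
--     cnt = 0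
--     i = 0
--     n = len(prefs)
--     while i < n:
--         j = i + 1
--         while j < n and prefs[j] == prefs[i]:
--             j += 1
--         if j - i >= 2:
--             cnt += 1
--         i = j
--     return cnt
-- ===== Notes on version B (the rewrite author's own statement) =====
-- stated objective: alternative
-- what changed: Replaces defaultdict grouping plus a second pass over the dict with sort-then-sweep: collect the k-prefixes of long-enough words, sort them, and count maximal runs of length >= 2 in one adjacent scan.
import Mathlib
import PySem

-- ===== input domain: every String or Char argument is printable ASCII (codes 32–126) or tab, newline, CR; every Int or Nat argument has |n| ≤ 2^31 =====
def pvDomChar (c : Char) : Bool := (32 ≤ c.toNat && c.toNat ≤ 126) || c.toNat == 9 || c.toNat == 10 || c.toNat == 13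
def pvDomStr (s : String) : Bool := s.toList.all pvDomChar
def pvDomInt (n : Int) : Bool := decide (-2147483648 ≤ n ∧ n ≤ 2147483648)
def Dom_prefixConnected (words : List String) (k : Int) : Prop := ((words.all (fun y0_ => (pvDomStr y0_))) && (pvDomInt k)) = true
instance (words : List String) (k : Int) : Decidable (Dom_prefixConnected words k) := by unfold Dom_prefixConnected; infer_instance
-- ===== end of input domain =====

-- B replaces dict grouping + a second pass over the dict with sort-then-sweep over the prefixes (alternative decomposition, same result).

-- word[:k]  (both Pythons write this same slice)
def pvPrefix (word : String) (k : Int) : String := String.mk (PySem.List.slice word.toList none (some k))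

-- ===== PORT A =====
def prefixConnected (words : List String) (k : Int) : Int :=
  let dic := words.foldl (fun d word =>
      if PySem.Str.len word < k then d
      else d.modify (pvPrefix word k) [] (fun vs => vs ++ [word])) PySem.Dict.empty
  dic.items.foldl (fun cnt p => if 2 ≤ p.2.length then cnt + 1 else cnt) 0

-- ===== PORT B =====
-- the outer while loop of Source B consumes one maximal run of equal prefixes per iteration:
-- run length is j - i = 1 + (number of following equal prefixes); i jumps to j (= drop the run)
def pvSweep (prefs : List String) (cnt : Int) : Int :=
  match prefs with
  | [] => cnt
  | p :: rest =>
    pvSweep (rest.dropWhile (fun q => q == p))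
      (if 2 ≤ 1 + (rest.takeWhile (fun q => q == p)).length then cnt + 1 else cnt)
termination_by prefs.length
decreasing_by simpa using Nat.lt_succ_of_le (List.length_dropWhile_le _ _)

def prefixConnected_alt (words : List String) (k : Int) : Int :=
  let prefs := PySem.List.sorted
    ((words.filter (fun word => decide (k ≤ PySem.Str.len word))).map (fun word => pvPrefix word k))
    (fun x => x) false
  pvSweep prefs 0

-- ===== PRECONDITION & SPEC =====
def Spec_prefixConnected (words : List String) (k : Int) (out : Int) : Prop := out = prefixConnected_alt words k
instance (words : List String) (k : Int) (out : Int) : Decidable (Spec_prefixConnected words k out) := by unfold Spec_prefixConnected; infer_instance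

-- ===== CLAIM (what is proved, stated in full; the proofs are below) =====
def Claim_equal_prefixConnected : Prop := ∀ (words : List String) (k : Int), Dom_prefixConnected words k → Spec_prefixConnected words k (prefixConnected words k)

-- ===== LEMMAS AND PROOFS =====

-- the multiset of k-prefixes of the admitted words
def pvP (words : List String) (k : Int) : List String :=
  (words.filter (fun word => decide (k ≤ PySem.Str.len word))).map (fun word => pvPrefix word k)

-- the common specification: number of distinct prefixes occurring at least twice
def pvSpecN (P : List String) : Nat :=
  (P.toFinset.filter (fun p => 2 ≤ P.count p)).card

-- A's grouping loop, abbreviated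
def pvStepA (k : Int) (d : PySem.Dict String (List String)) (word : String) : PySem.Dict String (List String) :=
  if PySem.Str.len word < k then d
  else d.modify (pvPrefix word k) [] (fun vs => vs ++ [word])

lemma pvGetD_foldA (k : Int) (l : List String) (d : PySem.Dict String (List String)) (p : String) :
    ((l.foldl (pvStepA k) d).getD p []) =
      d.getD p [] ++ l.filter (fun w => decide (k ≤ PySem.Str.len w) && (pvPrefix w k == p)) := by
  induction l generalizing d with
  | nil => simp
  | cons w l ih =>
    have hlenS : PySem.Str.len w = (w.length : Int) := by simp [PySem.Str.len, PySem.Chars.len]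
    simp only [List.foldl_cons, List.filter_cons, ih, pvStepA, hlenS]
    by_cases hlen : (w.length : Int) < k
    · rw [if_pos hlen]
      have hb : (decide (k ≤ (w.length : Int)) && (pvPrefix w k == p)) = false := by
        simp [not_le.mpr hlen]
      simp [hb]
    · rw [if_neg hlen, PySem.Dict.getD_modify]
      by_cases hp : p = pvPrefix w k
      · have hb : (decide (k ≤ (w.length : Int)) && (pvPrefix w k == p)) = true := by
          simp [hp, not_lt.mp hlen]
        simp [hb, hp, not_lt.mp hlen]
      · have hb : (decide (k ≤ (w.length : Int)) && (pvPrefix w k == p)) = false := by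
          simp [beq_eq_false_iff_ne.mpr (Ne.symm hp)]
        simp [hb, hp]

lemma pvKeys_foldA_nodup (k : Int) (l : List String) (d : PySem.Dict String (List String))
    (hd : d.keys.Nodup) : (l.foldl (pvStepA k) d).keys.Nodup := by
  induction l generalizing d with
  | nil => simpa
  | cons w l ih =>
    simp only [List.foldl_cons]
    apply ih
    unfold pvStepA
    split
    · exact hd
    · have := PySem.Dict.keys_modify d (pvPrefix w k) [] (fun vs => vs ++ [w])
      rw [this]
      exact PySem.Dict.nodup_keys_insert _ _ _ hd

lemma pvMem_keys_foldA (k : Int) (l : List String) (d : PySem.Dict String (List String)) (p : String) :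
    p ∈ (l.foldl (pvStepA k) d).keys ↔ p ∈ d.keys ∨ p ∈ pvP l k := by
  induction l generalizing d with
  | nil => simp [pvP]
  | cons w l ih =>
    simp only [List.foldl_cons, ih]
    unfold pvStepA
    have hmemP : p ∈ pvP (w :: l) k ↔
        (k ≤ (w.length : Int) ∧ p = pvPrefix w k) ∨ p ∈ pvP l k := by
      simp only [pvP, List.filter_cons]
      by_cases hlen : k ≤ (w.length : Int)
      · simp [hlen, eq_comm, or_assoc]
      · simp [hlen]
    have hlenS : PySem.Str.len w = (w.length : Int) := by simp [PySem.Str.len, PySem.Chars.len]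
    rw [hlenS]
    by_cases hlt : (w.length : Int) < k
    · rw [if_pos hlt, hmemP]
      constructor
      · rintro (h | h)
        · exact Or.inl h
        · exact Or.inr (Or.inr h)
      · rintro (h | ⟨hle, _⟩ | h)
        · exact Or.inl h
        · exact absurd hlt (not_lt.mpr hle)
        · exact Or.inr h
    · rw [if_neg hlt, PySem.Dict.keys_modify, hmemP]
      rw [PySem.Dict.mem_keys_insert]
      constructor
      · rintro ((h | h) | h)
        · exact Or.inr (Or.inl ⟨not_lt.mp hlt, h⟩)
        · exact Or.inl h
        · exact Or.inr (Or.inr h)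
      · rintro (h | ⟨_, h⟩ | h)
        · exact Or.inl (Or.inr h)
        · exact Or.inl (Or.inl h)
        · exact Or.inr h

-- countP of a nodup list as a Finset count
lemma pvCountP_eq_card (l : List String) (hl : l.Nodup) (q : String → Bool) :
    l.countP q = (l.toFinset.filter (fun x => q x = true)).card := by
  rw [List.countP_eq_length_filter, ← List.toFinset_filter,
    List.toFinset_card_of_nodup (hl.filter q)]

-- A computes pvSpecN of the prefix multiset
lemma pvA_eq_spec (words : List String) (k : Int) :
    prefixConnected words k = (pvSpecN (pvP words k) : Int) := by
  unfold prefixConnected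
  simp only []
  set dic := words.foldl (pvStepA k) PySem.Dict.empty with hdic
  have hnodup : dic.keys.Nodup := pvKeys_foldA_nodup k words _ PySem.Dict.nodup_keys_empty
  have hitems := PySem.Dict.items_eq_map_keys dic hnodup []
  have hfold : ∀ (a : Int) (items : List (String × List String)),
      items.foldl (fun cnt p => if 2 ≤ p.2.length then cnt + 1 else cnt) a =
        a + (items.countP (fun p => decide (2 ≤ p.2.length)) : Int) := by
    have := PySem.List.foldl_count_if (fun p : String × List String => decide (2 ≤ p.2.length))
    intro a items
    rw [← this items a]
    congr 1
    funext cnt p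
    simp
  rw [show (words.foldl (fun d word =>
      if PySem.Str.len word < k then d
      else d.modify (pvPrefix word k) [] (fun vs => vs ++ [word])) PySem.Dict.empty) = dic from rfl]
  rw [hfold, hitems, List.countP_map]
  have hgetD : ∀ p, (dic.getD p []).length = (pvP words k).count p := by
    intro p
    rw [hdic, pvGetD_foldA]
    simp only [PySem.Dict.getD_empty, List.nil_append]
    unfold pvP
    rw [List.count, List.countP_map, List.countP_eq_length_filter, List.filter_filter]
    rw [← List.countP_eq_length_filter, ← List.countP_eq_length_filter]
    apply List.countP_congr
    intro w _
    simp only [Function.comp]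
    rw [Bool.and_comm]
  have hcong : (dic.keys.countP ((fun p : String × List String => decide (2 ≤ p.2.length)) ∘
        fun p => (p, dic.getD p []))) =
      dic.keys.countP (fun p => decide (2 ≤ (pvP words k).count p)) := by
    apply List.countP_congr
    intro x _
    simp [Function.comp, hgetD x]
  rw [hcong, pvCountP_eq_card _ hnodup]
  have hset : dic.keys.toFinset = (pvP words k).toFinset := by
    ext x
    simp only [List.mem_toFinset]
    rw [hdic, pvMem_keys_foldA]
    simp
  unfold pvSpecN
  rw [hset]
  norm_num

-- the sweep on a ≤-sorted list computes pvSpecN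
lemma pvSweep_eq_spec (S : List String) (cnt : Int) :
    S.Pairwise (· ≤ ·) → pvSweep S cnt = cnt + (pvSpecN S : Int) := by
  induction S, cnt using pvSweep.induct with
  | case1 cnt => intro _; simp [pvSweep, pvSpecN]
  | case2 cnt p rest ih =>
    intro hS
    set run := rest.takeWhile (fun q => q == p) with hrun
    set rest' := rest.dropWhile (fun q => q == p) with hrest'
    have hsplit : run ++ rest' = rest := List.takeWhile_append_dropWhile
    have hrunAll : ∀ q ∈ run, q = p := by
      intro q hq
      have := List.mem_takeWhile_imp hq
      simpa using this
    have hrestLe : ∀ q ∈ rest, p ≤ q := fun q hq => (List.pairwise_cons.mp hS).1 q hq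
    have hrest'S : rest'.Sublist rest := List.dropWhile_sublist _
    have hPnotMem : p ∉ rest' := by
      intro hp
      cases hcase : rest' with
      | nil => rw [hcase] at hp; simp at hp
      | cons h t =>
        have hhd := List.head?_dropWhile_not (fun q => q == p) rest
        rw [← hrest', hcase] at hhd
        simp only [List.head?_cons] at hhd
        have hne : h ≠ p := by simpa using hhd
        rw [hcase] at hp
        rcases List.mem_cons.mp hp with h1 | h1
        · exact hne h1.symm
        · -- h ≤ p from pairwise on rest', p ≤ h from hrestLe
          have hpair : rest'.Pairwise (· ≤ ·) :=
            ((List.pairwise_cons.mp hS).2).sublist hrest'S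
          rw [hcase] at hpair
          have hle1 : h ≤ p := (List.pairwise_cons.mp hpair).1 p h1
          have hle2 : p ≤ h := hrestLe h (hrest'S.mem (hcase ▸ List.mem_cons_self))
          exact hne (le_antisymm hle1 hle2)
    have hrest'Pair : rest'.Pairwise (· ≤ ·) := ((List.pairwise_cons.mp hS).2).sublist hrest'S
    have hcountp : (p :: rest).count p = run.length + 1 := by
      rw [← hsplit]
      simp only [List.count_cons_self, List.count_append]
      have h1 : run.count p = run.length := by
        rw [List.count_eq_length.mpr (fun q hq => ((hrunAll q hq).symm : p = q))]
      have h2 : rest'.count p = 0 := List.count_eq_zero.mpr hPnotMem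
      omega
    have hcountq : ∀ q, q ≠ p → (p :: rest).count q = rest'.count q := by
      intro q hq
      rw [← hsplit, List.count_cons_of_ne (Ne.symm hq), List.count_append,
        List.count_eq_zero.mpr (fun hmem => hq (hrunAll q hmem)), Nat.zero_add]
    have hset : (p :: rest).toFinset = insert p rest'.toFinset := by
      ext x
      simp only [List.mem_toFinset, Finset.mem_insert, List.mem_cons, ← hsplit,
        List.mem_append, List.mem_toFinset]
      constructor
      · rintro (h | h | h)
        · exact Or.inl h
        · exact Or.inl (hrunAll x h)
        · exact Or.inr h
      · rintro (h | h)
        · exact Or.inl h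
        · exact Or.inr (Or.inr h)
    have hspec : pvSpecN (p :: rest) = (if 2 ≤ 1 + run.length then 1 else 0) + pvSpecN rest' := by
      unfold pvSpecN
      rw [hset, Finset.filter_insert]
      have hfc : Finset.filter (fun x => 2 ≤ (p :: rest).count x) rest'.toFinset =
          Finset.filter (fun x => 2 ≤ rest'.count x) rest'.toFinset := by
        apply Finset.filter_congr
        intro x hx
        have hxne : x ≠ p := fun h => hPnotMem (h ▸ List.mem_toFinset.mp hx)
        rw [hcountq x hxne]
      rw [hfc]
      by_cases hcond : 2 ≤ 1 + run.length
      · rw [if_pos (by omega : 2 ≤ (p :: rest).count p), if_pos hcond,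
          Finset.card_insert_of_notMem (fun hmem => hPnotMem
            (List.mem_toFinset.mp (Finset.mem_of_mem_filter p hmem)))]
        omega
      · rw [if_neg (by omega : ¬ 2 ≤ (p :: rest).count p), if_neg hcond]
        omega
    rw [pvSweep, ← hrun, ← hrest']
    simp only [dite_eq_ite] at ih
    rw [ih hrest'Pair, hspec]
    push_cast
    split_ifs <;> ring

lemma pvB_eq_spec (words : List String) (k : Int) :
    prefixConnected_alt words k = (pvSpecN (pvP words k) : Int) := by
  unfold prefixConnected_alt
  simp only []
  set S := PySem.List.sorted (pvP words k) (fun x => x) false with hS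
  have hperm : S.Perm (pvP words k) := PySem.List.sorted_perm _ _ false
  have hpair : S.Pairwise (· ≤ ·) := by
    have := PySem.List.sorted_pairwise (pvP words k) (fun x => x)
    simpa using this
  rw [show PySem.List.sorted
      ((words.filter (fun word => decide (k ≤ PySem.Str.len word))).map (fun word => pvPrefix word k))
      (fun x => x) false = S from rfl]
  rw [pvSweep_eq_spec S 0 hpair, zero_add]
  congr 1
  unfold pvSpecN
  have hset : S.toFinset = (pvP words k).toFinset := by
    ext x; simp [hperm.mem_iff]
  rw [hset]
  congr 1
  apply Finset.filter_congr
  intro x _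
  simp [hperm.count_eq x]

-- ===== VERDICT (by name: the statement is the Claim_ definition above) =====
theorem prefixConnected_spec : Claim_equal_prefixConnected := by
  intro words k _
  unfold Spec_prefixConnected
  rw [pvA_eq_spec, pvB_eq_spec]
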